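-- pv_equiv track=rewrite | github.com/KunalSolanki01/Leetcode-Problem-Solving | 4122-final-element-after-subarray-deletions/final-element-after-subarray-deletions.py | finalElement
-- ===== SOURCE A (Python) =====
-- def finalElement(nums):
--     """
--     :type nums: List[int]
--     :rtype: int
--     """
--     n = len(nums)
--     pre = nums[0]
--     best = pre
--     for i in range(1,n):
--         pre = min(pre,nums[i]);
--         best = max(best,pre)
--     suf = nums[-1]
--     best = max(best,suf)
--     for i in range(n-2,-1,-1):
--         suf = min(suf,nums[i])
--         best = max(best,suf)
--     return best
-- ===== SOURCE B (Python) =====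
-- def finalElement(nums):
--     """
--     :type nums: List[int]
--     :rtype: int
--     """
--     # prefix-mins and suffix-mins are non-increasing sequences starting at
--     # nums[0] and nums[-1], so the max over all of them is just these two.
--     return max(nums[0], nums[-1])
-- ===== Notes on version B (the rewrite author's own statement) =====
-- stated objective: simpler
-- what changed: Replaced both prefix-min and suffix-min scans with the closed form max(nums[0], nums[-1]), valid because prefix/suffix minima are non-increasing so their maxima are the endpoints.
import Mathlib
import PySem

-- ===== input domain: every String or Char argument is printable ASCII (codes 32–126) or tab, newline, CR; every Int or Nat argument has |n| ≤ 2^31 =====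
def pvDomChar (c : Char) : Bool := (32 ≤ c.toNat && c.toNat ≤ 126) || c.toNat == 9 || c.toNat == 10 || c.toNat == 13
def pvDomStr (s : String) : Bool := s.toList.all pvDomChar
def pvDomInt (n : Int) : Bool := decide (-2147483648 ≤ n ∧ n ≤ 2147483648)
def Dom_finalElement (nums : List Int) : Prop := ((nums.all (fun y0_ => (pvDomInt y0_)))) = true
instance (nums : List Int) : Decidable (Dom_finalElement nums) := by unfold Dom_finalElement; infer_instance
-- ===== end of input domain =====

-- B replaces A's two linear min/max scans by the closed form max(nums[0], nums[-1]) (simpler, O(1)).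

-- ===== PORT A =====
def finalElement (nums : List Int) : Int :=
  let n : Int := nums.length
  let pre := PySem.List.pyGetD nums 0 0
  let best := pre
  let s1 := (PySem.List.pyRange 1 n 1).foldl (fun (s : Int × Int) i =>
      let pre := min s.1 (PySem.List.pyGetD nums i 0)
      (pre, max s.2 pre)) (pre, best)
  let suf := PySem.List.pyGetD nums (-1) 0
  let best2 := max s1.2 suf
  let s2 := (PySem.List.pyRange (n - 2) (-1) (-1)).foldl (fun (s : Int × Int) i =>
      let suf := min s.1 (PySem.List.pyGetD nums i 0)
      (suf, max s.2 suf)) (suf, best2)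
  s2.2

-- ===== PORT B =====
def finalElement_alt (nums : List Int) : Int :=
  max (PySem.List.pyGetD nums 0 0) (PySem.List.pyGetD nums (-1) 0)

-- ===== PRECONDITION & SPEC =====
-- Pre_ excludes only the empty list, on which A raises IndexError at nums[0].
def Pre_finalElement (nums : List Int) : Prop := nums ≠ []
instance (nums : List Int) : Decidable (Pre_finalElement nums) := by unfold Pre_finalElement; infer_instance
def pvWitness_finalElement : List Int := ([3, 1, 5])

def Spec_finalElement (nums : List Int) (out : Int) : Prop := out = finalElement_alt nums
instance (nums : List Int) (out : Int) : Decidable (Spec_finalElement nums out) := by unfold Spec_finalElement; infer_instance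

-- ===== CLAIM (what is proved, stated in full; the proofs are below) =====
def Claim_equal_finalElement : Prop := ∀ (nums : List Int), Dom_finalElement nums → Pre_finalElement nums → Spec_finalElement nums (finalElement nums)

-- ===== LEMMAS AND PROOFS =====

-- A's loop invariant: if the running minimum is ≤ best, best never changes.
theorem pv_loop_snd (g : Int → Int) : ∀ (l : List Int) (p b : Int), p ≤ b →
    (l.foldl (fun (s : Int × Int) i =>
      let q := min s.1 (g i)
      (q, max s.2 q)) (p, b)).2 = b := by
  intro l
  induction l with
  | nil => intro p b _; simp
  | cons a t ih =>
    intro p b hpb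
    simp only [List.foldl_cons]
    have hq : min p (g a) ≤ b := le_trans (min_le_left _ _) hpb
    have : max b (min p (g a)) = b := max_eq_left hq
    simpa [this] using ih (min p (g a)) b hq

-- ===== VERDICT (by name: the statement is the Claim_ definition above) =====
theorem finalElement_spec : Claim_equal_finalElement := by
  intro nums _ hpre
  unfold Spec_finalElement finalElement finalElement_alt
  simp only []
  set x0 := PySem.List.pyGetD nums 0 0 with hx0
  set xl := PySem.List.pyGetD nums (-1) 0 with hxl
  have h1 : ((PySem.List.pyRange 1 (nums.length : Int) 1).foldl (fun (s : Int × Int) i =>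
      let pre := min s.1 (PySem.List.pyGetD nums i 0)
      (pre, max s.2 pre)) (x0, x0)).2 = x0 :=
    pv_loop_snd _ _ x0 x0 le_rfl
  have h2 : ((PySem.List.pyRange ((nums.length : Int) - 2) (-1) (-1)).foldl (fun (s : Int × Int) i =>
      let suf := min s.1 (PySem.List.pyGetD nums i 0)
      (suf, max s.2 suf)) (xl, max x0 xl)).2 = max x0 xl :=
    pv_loop_snd _ _ xl (max x0 xl) (le_max_right _ _)
  simp [h1, h2]
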